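-- pv_equiv track=rewrite | github.com/TemuujinE/BolorSoft-OCR | rot_net_v2.py | are_boxes_horizontally_aligned
-- ===== SOURCE A (Python) =====
-- def are_boxes_horizontally_aligned(boxes):
--     """
--     Check if multiple bounding boxes are horizontally aligned (on the same line).
--
--     Args:
--     - boxes: List of bounding boxes [x_min, y_min, x_max, y_max]
--
--     Returns:
--     - True if boxes are horizontally aligned, False otherwise
--     """
--     y_mins = [box[1] for box in boxes]
--     y_maxs = [box[3] for box in boxes]
--
--     # Check if the vertical overlap exists by comparing the min and max y-values
--     min_y_min = min(y_mins)
--     max_y_max = max(y_maxs)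
--
--     # All boxes should have overlapping y range if horizontally aligned
--     for box in boxes:
--         if box[1] > max_y_max or box[3] < min_y_min:
--             return False
--
--     return True
-- ===== SOURCE B (Python) =====
-- def are_boxes_horizontally_aligned(boxes):
--     min_y_min = min(box[1] for box in boxes)
--     max_y_min = max(box[1] for box in boxes)
--     min_y_max = min(box[3] for box in boxes)
--     max_y_max = max(box[3] for box in boxes)
--     return max_y_min <= max_y_max and min_y_max >= min_y_min
-- ===== Notes on version B (the rewrite author's own statement) =====
-- stated objective: simpler
-- what changed: B replaces A's per-box rejection loop by four aggregate extrema and a single direct comparison, with no per-box branch or early return.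
import Mathlib
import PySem

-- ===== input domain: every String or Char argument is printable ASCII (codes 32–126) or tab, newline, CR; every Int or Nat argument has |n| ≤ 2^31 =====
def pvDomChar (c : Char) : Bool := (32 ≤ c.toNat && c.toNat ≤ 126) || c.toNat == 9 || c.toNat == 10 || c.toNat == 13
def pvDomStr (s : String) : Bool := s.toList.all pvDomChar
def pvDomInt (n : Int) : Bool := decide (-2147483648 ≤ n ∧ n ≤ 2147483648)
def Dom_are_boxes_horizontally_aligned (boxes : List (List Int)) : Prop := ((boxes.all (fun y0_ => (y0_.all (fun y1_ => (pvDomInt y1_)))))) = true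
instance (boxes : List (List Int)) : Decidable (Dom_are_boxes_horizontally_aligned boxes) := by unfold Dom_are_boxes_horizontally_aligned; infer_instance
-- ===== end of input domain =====

-- B replaces A's per-box rejection loop by four aggregate extrema and one direct comparison (objective: simpler).


-- ===== PORT A =====
-- the 'for box in boxes: if … return False' loop
def pvALoop (minYMin maxYMax : Int) : List (List Int) → Bool
  | [] => true
  | box :: rest =>
    if PySem.List.pyGetD box 1 0 > maxYMax || PySem.List.pyGetD box 3 0 < minYMin then false
    else pvALoop minYMin maxYMax rest

def are_boxes_horizontally_aligned (boxes : List (List Int)) : Bool :=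
  let y_mins := boxes.map (fun box => PySem.List.pyGetD box 1 0)
  let y_maxs := boxes.map (fun box => PySem.List.pyGetD box 3 0)
  let min_y_min := (PySem.List.min? y_mins (fun y => y)).getD 0
  let max_y_max := (PySem.List.max? y_maxs (fun y => y)).getD 0
  pvALoop min_y_min max_y_max boxes

-- ===== PORT B =====
def are_boxes_horizontally_aligned_alt (boxes : List (List Int)) : Bool :=
  let min_y_min := (PySem.List.min? (boxes.map (fun box => PySem.List.pyGetD box 1 0)) (fun y => y)).getD 0
  let max_y_min := (PySem.List.max? (boxes.map (fun box => PySem.List.pyGetD box 1 0)) (fun y => y)).getD 0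
  let min_y_max := (PySem.List.min? (boxes.map (fun box => PySem.List.pyGetD box 3 0)) (fun y => y)).getD 0
  let max_y_max := (PySem.List.max? (boxes.map (fun box => PySem.List.pyGetD box 3 0)) (fun y => y)).getD 0
  decide (max_y_min ≤ max_y_max) && decide (min_y_max ≥ min_y_min)

-- ===== PRECONDITION & SPEC =====
-- Pre_ excludes exactly the inputs where the Python A raises: the empty list (min/max of an
-- empty sequence is a ValueError) and any box shorter than 4 (box[3] is an IndexError).
def Pre_are_boxes_horizontally_aligned (boxes : List (List Int)) : Prop :=
  boxes ≠ [] ∧ ∀ box ∈ boxes, 4 ≤ box.length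
instance (boxes : List (List Int)) : Decidable (Pre_are_boxes_horizontally_aligned boxes) := by
  unfold Pre_are_boxes_horizontally_aligned; infer_instance

def pvWitness_are_boxes_horizontally_aligned : List (List Int) := [[0, 1, 10, 5], [2, 3, 8, 6]]

def Spec_are_boxes_horizontally_aligned (boxes : List (List Int)) (out : Bool) : Prop := out = are_boxes_horizontally_aligned_alt boxes
instance (boxes : List (List Int)) (out : Bool) : Decidable (Spec_are_boxes_horizontally_aligned boxes out) := by unfold Spec_are_boxes_horizontally_aligned; infer_instance

-- ===== CLAIM (what is proved, stated in full; the proofs are below) =====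
def Claim_equal_are_boxes_horizontally_aligned : Prop := ∀ (boxes : List (List Int)), Dom_are_boxes_horizontally_aligned boxes → Pre_are_boxes_horizontally_aligned boxes → Spec_are_boxes_horizontally_aligned boxes (are_boxes_horizontally_aligned boxes)

-- ===== LEMMAS AND PROOFS =====

theorem pvALoop_iff (m M : Int) (l : List (List Int)) :
    pvALoop m M l = true ↔ ∀ box ∈ l, PySem.List.pyGetD box 1 0 ≤ M ∧ m ≤ PySem.List.pyGetD box 3 0 := by
  induction l with
  | nil => simp [pvALoop]
  | cons b t ih =>
    simp only [pvALoop, List.mem_cons]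
    split
    · rename_i h
      simp only [Bool.or_eq_true, decide_eq_true_eq] at h
      constructor
      · intro hf; exact absurd hf (by simp)
      · intro hall
        have := hall b (Or.inl rfl)
        omega
    · rename_i h
      simp only [Bool.or_eq_true, decide_eq_true_eq, not_or] at h
      rw [ih]
      constructor
      · intro hall box hm
        rcases hm with rfl | hm
        · omega
        · exact hall box hm
      · intro hall box hm; exact hall box (Or.inr hm)

-- running max over a nonempty projected list bounds the list iff it is bounded
theorem foldl_max_le_iff (f : List Int → Int) (b : List Int) (t : List (List Int)) (M : Int) :
    (t.map f).foldl max (f b) ≤ M ↔ ∀ box ∈ b :: t, f box ≤ M := by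
  constructor
  · intro h box hm
    rcases List.mem_cons.mp hm with rfl | hm
    · exact le_trans (PySem.List.le_foldl_max (t.map f) (f box)).1 h
    · exact le_trans ((PySem.List.le_foldl_max (t.map f) (f b)).2 (f box) (List.mem_map_of_mem hm)) h
  · intro hall
    rcases PySem.List.foldl_max_mem (t.map f) (f b) with h | h
    · rw [h]; exact hall b (List.mem_cons_self ..)
    · obtain ⟨box, hbox, hfe⟩ := List.mem_map.mp h
      rw [← hfe]; exact hall box (List.mem_cons_of_mem _ hbox)

theorem le_foldl_min_iff (f : List Int → Int) (b : List Int) (t : List (List Int)) (m : Int) :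
    m ≤ (t.map f).foldl min (f b) ↔ ∀ box ∈ b :: t, m ≤ f box := by
  constructor
  · intro h box hm
    rcases List.mem_cons.mp hm with rfl | hm
    · exact le_trans h (PySem.List.foldl_min_le (t.map f) (f box)).1
    · exact le_trans h ((PySem.List.foldl_min_le (t.map f) (f b)).2 (f box) (List.mem_map_of_mem hm))
  · intro hall
    rcases PySem.List.foldl_min_mem (t.map f) (f b) with h | h
    · rw [h]; exact hall b (List.mem_cons_self ..)
    · obtain ⟨box, hbox, hfe⟩ := List.mem_map.mp h
      rw [← hfe]; exact hall box (List.mem_cons_of_mem _ hbox)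

-- ===== VERDICT (by name: the statement is the Claim_ definition above) =====
theorem are_boxes_horizontally_aligned_spec : Claim_equal_are_boxes_horizontally_aligned := by
  intro boxes _ hpre
  obtain ⟨hne, _⟩ := hpre
  obtain ⟨b, t, rfl⟩ := List.exists_cons_of_ne_nil hne
  unfold Spec_are_boxes_horizontally_aligned are_boxes_horizontally_aligned are_boxes_horizontally_aligned_alt
  simp only [List.map_cons, PySem.List.min?_id_cons, PySem.List.max?_id_cons, Option.getD_some]
  set f1 := fun box => PySem.List.pyGetD box 1 (0:Int) with hf1
  set f3 := fun box => PySem.List.pyGetD box 3 (0:Int) with hf3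
  rw [Bool.eq_iff_iff, pvALoop_iff]
  simp only [Bool.and_eq_true, decide_eq_true_eq, ge_iff_le]
  rw [foldl_max_le_iff f1 b t, le_foldl_min_iff f3 b t]
  constructor
  · intro h
    exact ⟨fun box hm => (h box hm).1, fun box hm => (h box hm).2⟩
  · intro ⟨h1, h3⟩ box hm
    exact ⟨h1 box hm, h3 box hm⟩
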